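-- pv_equiv track=rewrite | github.com/Rumply/Projet-Tron | Tron.py | collisionJoueur
-- ===== SOURCE A (Python) =====
-- def collisionJoueur(tabJoueur1, tabJoueur2):
--     """Cette fonction compare deux tableaux afin
--     de trouver qui à toucher qui."""
--     collision = ""
--     for eachSegment in tabJoueur1[:-2]:
--         if eachSegment[0] == tabJoueur1[-1][0]:
--             if eachSegment[1] == tabJoueur1[-1][1]:
--                 collision = "joueur"
--         if eachSegment[0] == tabJoueur2[-1][0]:
--             if eachSegment[1] == tabJoueur2[-1][1]:
--                 collision = "autre"
--     if tabJoueur1[-1][0] == tabJoueur2[-1][0] \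
--     and tabJoueur1[-1][1] == tabJoueur2[-1][1]:
--         collision = "null"
--     return collision
-- ===== SOURCE B (Python) =====
-- def collisionJoueur(tabJoueur1, tabJoueur2):
--     """Guard the head-on tie first, then scan the trail backwards and
--     return on the first segment hit (later segments win in A's forward
--     accumulate, so the first hit from the end is the same answer)."""
--     p1 = tabJoueur1[-1]
--     p2 = tabJoueur2[-1]
--     if p1[0] == p2[0] and p1[1] == p2[1]:
--         return "null"
--     for seg in reversed(tabJoueur1[:-2]):
--         if seg[0] == p2[0] and seg[1] == p2[1]:
--             return "autre"
--         if seg[0] == p1[0] and seg[1] == p1[1]: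
--             return "joueur"
--     return ""
-- ===== Notes on version B (the rewrite author's own statement) =====
-- stated objective: simpler
-- what changed: Replaces the forward full-pass accumulate-last-match loop plus final tie override with a tie guard followed by an early-exit reverse scan that returns on the first matching segment.
import Mathlib
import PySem

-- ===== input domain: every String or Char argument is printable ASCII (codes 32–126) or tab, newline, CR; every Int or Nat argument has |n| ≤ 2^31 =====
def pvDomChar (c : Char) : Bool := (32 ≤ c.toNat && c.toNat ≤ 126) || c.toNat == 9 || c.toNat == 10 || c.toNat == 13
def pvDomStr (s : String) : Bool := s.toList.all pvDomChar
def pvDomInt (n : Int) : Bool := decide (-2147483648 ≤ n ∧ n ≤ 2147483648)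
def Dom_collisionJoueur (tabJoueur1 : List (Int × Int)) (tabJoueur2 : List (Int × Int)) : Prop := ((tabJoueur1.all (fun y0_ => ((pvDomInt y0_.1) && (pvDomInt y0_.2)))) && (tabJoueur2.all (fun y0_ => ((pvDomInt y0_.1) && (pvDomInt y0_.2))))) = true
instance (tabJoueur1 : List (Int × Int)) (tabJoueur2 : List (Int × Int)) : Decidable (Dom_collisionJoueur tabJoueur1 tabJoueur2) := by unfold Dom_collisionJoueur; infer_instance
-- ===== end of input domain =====

-- B replaces A's forward accumulate-last-match pass (plus final tie override) with a
-- tie guard followed by an early-exit reverse scan: simpler decomposition, same O(n).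


-- ===== PORT A =====
-- literal port: forward loop over tabJoueur1[:-2] overwriting the accumulator,
-- then the head-on tie overrides everything with "null"
def collisionJoueur (tabJoueur1 : List (Int × Int)) (tabJoueur2 : List (Int × Int)) : String :=
  match PySem.List.pyGet? tabJoueur1 (-1), PySem.List.pyGet? tabJoueur2 (-1) with
  | some p1, some p2 =>
    let collision := (PySem.List.slice tabJoueur1 none (some (-2))).foldl
      (fun collision eachSegment =>
        let collision := if eachSegment.1 = p1.1 ∧ eachSegment.2 = p1.2 then "joueur" else collision
        if eachSegment.1 = p2.1 ∧ eachSegment.2 = p2.2 then "autre" else collision) ""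
    if p1.1 = p2.1 ∧ p1.2 = p2.2 then "null" else collision
  | _, _ => ""  -- unreachable under Pre_ (Python raises IndexError on an empty list)

-- ===== PORT B =====
-- early-exit reverse scan of tabJoueur1[:-2] ('for seg in reversed(...)' with returns)
def altScan (p1 p2 : Int × Int) : List (Int × Int) → String
  | [] => ""
  | seg :: rest =>
    if seg.1 = p2.1 ∧ seg.2 = p2.2 then "autre"
    else if seg.1 = p1.1 ∧ seg.2 = p1.2 then "joueur"
    else altScan p1 p2 rest

def collisionJoueur_alt (tabJoueur1 : List (Int × Int)) (tabJoueur2 : List (Int × Int)) : String :=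
  match PySem.List.pyGet? tabJoueur1 (-1) with
  | none => ""  -- unreachable under Pre_ (Python raises IndexError on an empty list)
  | some p1 =>
    match PySem.List.pyGet? tabJoueur2 (-1) with
    | none => ""  -- unreachable under Pre_
    | some p2 =>
      if p1.1 = p2.1 ∧ p1.2 = p2.2 then "null"
      else altScan p1 p2 (PySem.List.slice tabJoueur1 none (some (-2))).reverse

-- ===== PRECONDITION & SPEC =====
-- Pre_ excludes exactly the inputs where Python A raises IndexError: an empty
-- tabJoueur1 or tabJoueur2 (both A and B index [-1] of both lists).
def Pre_collisionJoueur (tabJoueur1 : List (Int × Int)) (tabJoueur2 : List (Int × Int)) : Prop :=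
  tabJoueur1 ≠ [] ∧ tabJoueur2 ≠ []
instance (tabJoueur1 : List (Int × Int)) (tabJoueur2 : List (Int × Int)) : Decidable (Pre_collisionJoueur tabJoueur1 tabJoueur2) := by unfold Pre_collisionJoueur; infer_instance

def pvWitness_collisionJoueur : (List (Int × Int)) × (List (Int × Int)) :=
  ([(0, 0), (1, 1), (2, 2)], [(3, 3)])

def Spec_collisionJoueur (tabJoueur1 : List (Int × Int)) (tabJoueur2 : List (Int × Int)) (out : String) : Prop := out = collisionJoueur_alt tabJoueur1 tabJoueur2
instance (tabJoueur1 : List (Int × Int)) (tabJoueur2 : List (Int × Int)) (out : String) : Decidable (Spec_collisionJoueur tabJoueur1 tabJoueur2 out) := by unfold Spec_collisionJoueur; infer_instance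

-- ===== CLAIM (what is proved, stated in full; the proofs are below) =====
def Claim_equal_collisionJoueur : Prop := ∀ (tabJoueur1 : List (Int × Int)) (tabJoueur2 : List (Int × Int)), Dom_collisionJoueur tabJoueur1 tabJoueur2 → Pre_collisionJoueur tabJoueur1 tabJoueur2 → Spec_collisionJoueur tabJoueur1 tabJoueur2 (collisionJoueur tabJoueur1 tabJoueur2)

-- ===== LEMMAS AND PROOFS =====

-- A's forward last-match-wins fold equals B's reverse first-match scan (which
-- returns "" when nothing matches, in which case the fold keeps its accumulator).
theorem foldl_eq_altScan (p1 p2 : Int × Int) (l : List (Int × Int)) (c : String) :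
    l.foldl (fun collision eachSegment =>
      let collision := if eachSegment.1 = p1.1 ∧ eachSegment.2 = p1.2 then "joueur" else collision
      if eachSegment.1 = p2.1 ∧ eachSegment.2 = p2.2 then "autre" else collision) c
    = (if altScan p1 p2 l.reverse = "" then c else altScan p1 p2 l.reverse) := by
  induction l using List.reverseRecOn generalizing c with
  | nil => simp [altScan]
  | append_singleton l a ih =>
    rw [List.foldl_append, ih]
    simp only [List.foldl_cons, List.foldl_nil, List.reverse_append, List.reverse_singleton,
      List.singleton_append, altScan]
    by_cases h2 : a.1 = p2.1 ∧ a.2 = p2.2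
    · simp [h2]
    · by_cases h1 : a.1 = p1.1 ∧ a.2 = p1.2
      · have hne : ¬(p1.1 = p2.1 ∧ p1.2 = p2.2) := by
          rw [← h1.1, ← h1.2]; exact h2
        simp [h1, hne]
      · simp [h1, h2]

-- ===== VERDICT (by name: the statement is the Claim_ definition above) =====
theorem collisionJoueur_spec : Claim_equal_collisionJoueur := by
  intro t1 t2 _ _
  unfold Spec_collisionJoueur collisionJoueur collisionJoueur_alt
  cases hg1 : PySem.List.pyGet? t1 (-1) with
  | none => rfl
  | some p1 =>
    cases hg2 : PySem.List.pyGet? t2 (-1) with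
    | none => rfl
    | some p2 =>
      simp only [foldl_eq_altScan p1 p2]
      by_cases htie : p1.1 = p2.1 ∧ p1.2 = p2.2
      · simp [htie]
      · simp only [if_neg htie]
        by_cases h : altScan p1 p2 (PySem.List.slice t1 none (some (-2))).reverse = "" <;>
          simp [h]
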